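-- pv_equiv track=rewrite | github.com/andradenathan/computacao1-2020-1 | exemplos/exemplo11.py | maiorLinha
-- ===== SOURCE A (Python) =====
-- def maiorLinha(matriz):
--     somas = []
--     for i in range(len(matriz)):
--         soma = 0
--         for j in range(len(matriz[0])):
--             soma += matriz[i][j]
--         list.append(somas, soma)
--     maior = max(somas)
--     pos = list.index(somas, maior)
--     return matriz[pos], maior
-- ===== SOURCE B (Python) =====
-- def maiorLinha(matriz):
--     ncols = len(matriz[0])
--     melhor = None
--     for linha in matriz:
--         soma = 0
--         for j in range(ncols):
--             soma += linha[j]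
--         if melhor is None or soma > melhor[1]:
--             melhor = (linha, soma)
--     return melhor
-- ===== Notes on version B (the rewrite author's own statement) =====
-- stated objective: simpler
-- what changed: Instead of building a list of all row sums and then scanning it twice more (max, then list.index) before a final indexed lookup, B keeps a single running best (row, sum) pair in one pass over the rows, with strict > preserving the first-maximum tie-break.
-- outside the precondition, e.g. on maiorLinha([]): A raises ValueError, B raises IndexError
import Mathlib
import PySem

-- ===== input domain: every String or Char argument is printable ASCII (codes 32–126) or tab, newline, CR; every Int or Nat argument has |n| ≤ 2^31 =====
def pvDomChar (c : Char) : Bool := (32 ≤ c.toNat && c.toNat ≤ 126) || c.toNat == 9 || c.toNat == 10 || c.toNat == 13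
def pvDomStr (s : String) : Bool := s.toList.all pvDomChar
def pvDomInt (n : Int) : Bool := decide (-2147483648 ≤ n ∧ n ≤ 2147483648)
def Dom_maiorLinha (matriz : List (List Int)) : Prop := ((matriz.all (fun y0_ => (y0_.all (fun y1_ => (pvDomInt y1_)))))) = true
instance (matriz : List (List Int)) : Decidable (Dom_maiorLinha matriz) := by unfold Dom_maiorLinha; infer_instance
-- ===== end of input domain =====

-- B replaces A's three scans (collect all row sums, max over them, list.index into them)
-- by one pass keeping the running best (row, sum) pair; equal output on Pre_ (first max wins in both).


-- ===== PORT A =====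
def maiorLinha (matriz : List (List Int)) : List Int × Int :=
  let somas := (List.range matriz.length).foldl
    (fun acc i => acc ++ [(List.range (matriz.headD []).length).foldl
        (fun soma j => soma + ((matriz.getD i []).getD j 0)) 0]) []
  let maior := (PySem.List.max? somas (fun x => x)).getD 0
  let pos := (PySem.List.index? somas maior).getD 0
  (matriz.getD pos [], maior)

-- ===== PORT B =====
def maiorLinha_alt (matriz : List (List Int)) : List Int × Int :=
  let ncols := (matriz.headD []).length
  (matriz.foldl
    (fun melhor linha =>
      let soma := (List.range ncols).foldl (fun s j => s + linha.getD j 0) 0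
      match melhor with
      | none => some (linha, soma)
      | some p => if p.2 < soma then some (linha, soma) else melhor)
    (none : Option (List Int × Int))).getD ([], 0)

-- ===== PRECONDITION & SPEC =====
-- Pre_ excludes exactly the inputs where A raises: the empty matrix (max([]) is a ValueError)
-- and matrices with some row shorter than the first row (matriz[i][j] is an IndexError).
def Pre_maiorLinha (matriz : List (List Int)) : Prop :=
  matriz ≠ [] ∧ ∀ row ∈ matriz, (matriz.headD []).length ≤ row.length
instance (matriz : List (List Int)) : Decidable (Pre_maiorLinha matriz) := by unfold Pre_maiorLinha; infer_instance
def pvWitness_maiorLinha : List (List Int) := [[1, 2], [3, 4]]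
def Spec_maiorLinha (matriz : List (List Int)) (out : List Int × Int) : Prop := out = maiorLinha_alt matriz
instance (matriz : List (List Int)) (out : List Int × Int) : Decidable (Spec_maiorLinha matriz out) := by unfold Spec_maiorLinha; infer_instance

-- ===== CLAIM (what is proved, stated in full; the proofs are below) =====
def Claim_equal_maiorLinha : Prop := ∀ (matriz : List (List Int)), Dom_maiorLinha matriz → Pre_maiorLinha matriz → Spec_maiorLinha matriz (maiorLinha matriz)

-- ===== LEMMAS AND PROOFS =====

-- the common specification: first row with maximal f-value, paired with that value
def pvSpecMax (f : List Int → Int) : List (List Int) → List Int × Int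
  | [] => ([], 0)
  | [r] => (r, f r)
  | r :: r' :: rs' =>
    let p := pvSpecMax f (r' :: rs')
    if p.2 ≤ f r then (r, f r) else p

lemma pvSpecMax_single (f : List Int → Int) (r : List Int) : pvSpecMax f [r] = (r, f r) := rfl

lemma pvSpecMax_pair (f : List Int → Int) (r r' : List Int) (rs' : List (List Int)) :
    pvSpecMax f (r :: r' :: rs')
      = if (pvSpecMax f (r' :: rs')).2 ≤ f r then (r, f r) else pvSpecMax f (r' :: rs') := rfl

def pvStep (f : List Int → Int) (melhor : Option (List Int × Int)) (linha : List Int) :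
    Option (List Int × Int) :=
  match melhor with
  | none => some (linha, f linha)
  | some p => if p.2 < f linha then some (linha, f linha) else melhor

lemma pvStep_some (f : List Int → Int) (c : List Int × Int) (r : List Int) :
    pvStep f (some c) r = some (if c.2 < f r then (r, f r) else c) := by
  by_cases hc : c.2 < f r <;> simp [pvStep, hc]

lemma pv_foldl_max (l : List Int) (a b : Int) :
    l.foldl max (max a b) = max a (l.foldl max b) := by
  induction l generalizing b with
  | nil => rfl
  | cons x t ih => simp only [List.foldl_cons, max_assoc]; rw [ih]

lemma pv_map_range_getD {α β : Type} (xs : List α) (d : α) (g : α → β) :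
    (List.range xs.length).map (fun i => g (xs.getD i d)) = xs.map g := by
  apply List.ext_getElem
  · simp
  · intro i h1 h2
    simp only [List.getElem_map, List.getElem_range, List.getD_eq_getElem?_getD]
    simp at h2 ⊢
    simp [List.getElem?_eq_getElem (by simpa using h2)]

lemma pv_B_fold (f : List Int → Int) (rs : List (List Int)) (b : List Int × Int) (h : rs ≠ []) :
    rs.foldl (pvStep f) (some b)
    = some (if b.2 < (pvSpecMax f rs).2 then pvSpecMax f rs else b) := by
  induction rs generalizing b with
  | nil => exact absurd rfl h
  | cons r rs ih =>
    rw [List.foldl_cons, pvStep_some]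
    cases rs with
    | nil => simp [pvSpecMax_single]
    | cons r' rs' =>
      rw [ih _ (by simp), pvSpecMax_pair]
      split_ifs with h1 h2 h3 h4 h5 <;> simp_all <;> omega

lemma pv_B_side (f : List Int → Int) (rows : List (List Int)) (h : rows ≠ []) :
    (rows.foldl (pvStep f) (none : Option (List Int × Int))).getD ([], 0) = pvSpecMax f rows := by
  cases rows with
  | nil => exact absurd rfl h
  | cons r rs =>
    rw [List.foldl_cons]
    rw [show pvStep f none r = some (r, f r) from rfl]
    cases rs with
    | nil => simp [pvSpecMax_single]
    | cons r' rs' =>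
      rw [pv_B_fold f (r' :: rs') (r, f r) (by simp), pvSpecMax_pair]
      simp only [Option.getD_some]
      split_ifs with h1 h2 h3 <;> first | rfl | omega

lemma pv_A_key (f : List Int → Int) (rows : List (List Int)) (h : rows ≠ []) :
    (rows.getD ((PySem.List.index? (rows.map f)
        ((PySem.List.max? (rows.map f) (fun x => x)).getD 0)).getD 0) [],
      (PySem.List.max? (rows.map f) (fun x => x)).getD 0) = pvSpecMax f rows := by
  induction rows with
  | nil => exact absurd rfl h
  | cons r rs ih =>
    cases rs with
    | nil => simp [pvSpecMax_single, PySem.List.index?, List.idxOf?_cons, PySem.List.max?_id_cons]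
    | cons r' rs' =>
      have hm' : PySem.List.max? ((r' :: rs').map f) (fun x => x)
          = some ((rs'.map f).foldl max (f r')) := by
        simp [PySem.List.max?_id_cons]
      set m' : Int := (rs'.map f).foldl max (f r') with hm'def
      have hmax : PySem.List.max? ((r :: r' :: rs').map f) (fun x => x)
          = some (max (f r) m') := by
        simp only [List.map_cons, PySem.List.max?_id_cons, List.foldl_cons]
        rw [pv_foldl_max]
      have ihe := ih (by simp)
      rw [hm'] at ihe
      simp only [Option.getD_some] at ihe
      by_cases hle : m' ≤ f r
      · -- head wins: the maximum is f r, whose first index is 0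
        rw [hmax]
        simp only [Option.getD_some, max_eq_left hle]
        have hidx : PySem.List.index? ((r :: r' :: rs').map f) (f r) = some 0 := by
          simp only [PySem.List.index?, List.map_cons]
          rw [List.idxOf?_cons]
          simp
        rw [hidx]
        simp only [Option.getD_some, List.getD_cons_zero]
        rw [pvSpecMax_pair, ← ihe]
        simp [hle]
      · -- tail wins: the maximum is m', one past its first index in the tail
        rw [not_le] at hle
        have hmem : m' ∈ (r' :: rs').map f := PySem.List.max?_mem hm'
        obtain ⟨p, hp⟩ := Option.isSome_iff_exists.mp (List.isSome_idxOf?.mpr hmem)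
        have hidx : PySem.List.index? ((r :: r' :: rs').map f) m' = some (p + 1) := by
          simp only [PySem.List.index?]
          rw [show List.map f (r :: r' :: rs') = f r :: List.map f (r' :: rs') from rfl,
            List.idxOf?_cons]
          have hne2 : (f r == m') = false := by simpa using ne_of_lt hle
          rw [hne2, hp]
          rfl
        rw [hmax]
        simp only [Option.getD_some, max_eq_right (le_of_lt hle), hidx, List.getD_cons_succ]
        have hp' : PySem.List.index? ((r' :: rs').map f) m' = some p := by
          simpa [PySem.List.index?] using hp
        rw [hp'] at ihe
        simp only [Option.getD_some] at ihe
        rw [pvSpecMax_pair, ← ihe]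
        simp [not_le.mpr hle]

lemma pv_main (f : List Int → Int) (matriz : List (List Int)) (h : matriz ≠ []) :
    (matriz.getD ((PySem.List.index?
          ((List.range matriz.length).foldl (fun acc i => acc ++ [f (matriz.getD i [])]) [])
          ((PySem.List.max?
              ((List.range matriz.length).foldl (fun acc i => acc ++ [f (matriz.getD i [])]) [])
              (fun x => x)).getD 0)).getD 0) [],
      (PySem.List.max?
          ((List.range matriz.length).foldl (fun acc i => acc ++ [f (matriz.getD i [])]) [])
          (fun x => x)).getD 0)
    = (matriz.foldl (pvStep f) (none : Option (List Int × Int))).getD ([], 0) := by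
  have hsomas : (List.range matriz.length).foldl
      (fun acc i => acc ++ [f (matriz.getD i [])]) [] = matriz.map f := by
    rw [PySem.List.foldl_append_singleton_eq_map (f := fun i => f (matriz.getD i []))]
    simpa using pv_map_range_getD matriz [] f
  rw [hsomas, pv_A_key f matriz h, pv_B_side f matriz h]

-- ===== VERDICT (by name: the statement is the Claim_ definition above) =====
theorem maiorLinha_spec : Claim_equal_maiorLinha := by
  intro matriz _hdom hpre
  exact pv_main
    (fun row => (List.range (matriz.headD []).length).foldl (fun s j => s + row.getD j 0) 0)
    matriz hpre.1
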